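-- pv_equiv track=rewrite | github.com/openxjarvis/clawdbot-python | openclaw/agents/context_pruning/pruner.py | find_assistant_cutoff_index
-- ===== SOURCE A (Python) =====
-- from typing import Any
--
-- def find_assistant_cutoff_index(
--     messages: list[dict[str, Any]],
--     keep_last_assistants: int,
-- ) -> int | None:
--     """
--     Find the index before which messages can be pruned.
--     Protects the last N assistant messages.
--     Mirrors TS findAssistantCutoffIndex().
--     """
--     if keep_last_assistants <= 0:
--         return len(messages)
--
--     remaining = keep_last_assistants
--     for i in range(len(messages) - 1, -1, -1):
--         msg = messages[i]
--         if not isinstance(msg, dict):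
--             continue
--
--         if msg.get("role") == "assistant":
--             remaining -= 1
--             if remaining == 0:
--                 return i
--
--     return None
-- ===== SOURCE B (Python) =====
-- def find_assistant_cutoff_index(messages, keep_last_assistants):
--     if keep_last_assistants <= 0:
--         return len(messages)
--     idxs = [i for i, m in enumerate(messages)
--             if isinstance(m, dict) and m.get("role") == "assistant"]
--     if len(idxs) < keep_last_assistants:
--         return None
--     return idxs[-keep_last_assistants]
-- ===== Notes on version B (the rewrite author's own statement) =====
-- stated objective: simpler
-- what changed: Replaces the reverse index countdown loop with early exit by a single forward pass building the list of assistant indices, then positional selection idxs[-keep_last_assistants].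
import Mathlib
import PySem

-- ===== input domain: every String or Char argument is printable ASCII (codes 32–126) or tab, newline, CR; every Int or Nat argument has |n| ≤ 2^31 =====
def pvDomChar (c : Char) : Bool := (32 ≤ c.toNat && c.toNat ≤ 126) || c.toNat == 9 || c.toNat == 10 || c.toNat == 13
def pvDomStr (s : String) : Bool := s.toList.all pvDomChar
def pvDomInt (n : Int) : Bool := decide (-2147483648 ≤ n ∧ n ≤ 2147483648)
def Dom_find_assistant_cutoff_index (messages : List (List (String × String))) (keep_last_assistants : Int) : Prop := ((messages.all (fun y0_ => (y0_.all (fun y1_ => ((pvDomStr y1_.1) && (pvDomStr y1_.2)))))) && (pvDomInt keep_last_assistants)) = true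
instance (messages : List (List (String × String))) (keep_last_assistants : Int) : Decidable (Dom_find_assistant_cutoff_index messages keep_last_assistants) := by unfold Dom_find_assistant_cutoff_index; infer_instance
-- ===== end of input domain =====

-- B replaces A's reverse countdown scan with a forward index-table build plus
-- positional selection; same behaviour, simpler decomposition (no speed claim).

-- ===== PORT A =====
-- A's reverse loop 'for i in range(len(messages)-1, -1, -1)' visits exactly the
-- pairs of (enumerate messages).reverse; the 'isinstance(msg, dict)' guard is
-- always true under the port's type, so the 'continue' branch is unreachable.
def pvAGo : List (Int × List (String × String)) → Int → Option Int
  | [], _ => none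
  | (i, msg) :: rest, remaining =>
    if (PySem.Dict.mk msg).get? "role" = some "assistant" then
      -- remaining -= 1; if remaining == 0: return i
      if remaining - 1 = 0 then some i else pvAGo rest (remaining - 1)
    else pvAGo rest remaining

def find_assistant_cutoff_index (messages : List (List (String × String))) (keep_last_assistants : Int) : Option Int :=
  if keep_last_assistants ≤ 0 then some (messages.length : Int)
  else pvAGo (PySem.List.enumerate messages).reverse keep_last_assistants

-- ===== PORT B =====
def find_assistant_cutoff_index_alt (messages : List (List (String × String))) (keep_last_assistants : Int) : Option Int :=
  if keep_last_assistants ≤ 0 then some (messages.length : Int)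
  else
    let idxs := ((PySem.List.enumerate messages).filter
        (fun p => decide ((PySem.Dict.mk p.2).get? "role" = some "assistant"))).map (fun p => p.1)
    if (idxs.length : Int) < keep_last_assistants then none
    else PySem.List.pyGet? idxs (-keep_last_assistants)

-- ===== PRECONDITION & SPEC =====
def Spec_find_assistant_cutoff_index (messages : List (List (String × String))) (keep_last_assistants : Int) (out : Option Int) : Prop := out = find_assistant_cutoff_index_alt messages keep_last_assistants
instance (messages : List (List (String × String))) (keep_last_assistants : Int) (out : Option Int) : Decidable (Spec_find_assistant_cutoff_index messages keep_last_assistants out) := by unfold Spec_find_assistant_cutoff_index; infer_instance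

-- ===== CLAIM (what is proved, stated in full; the proofs are below) =====
def Claim_equal_find_assistant_cutoff_index : Prop := ∀ (messages : List (List (String × String))) (keep_last_assistants : Int), Dom_find_assistant_cutoff_index messages keep_last_assistants → Spec_find_assistant_cutoff_index messages keep_last_assistants (find_assistant_cutoff_index messages keep_last_assistants)

-- ===== LEMMAS AND PROOFS =====

-- negative indexing steps past a final appended element
lemma pyGet?_append_singleton_neg {α : Type} (l : List α) (a : α) (m : Nat) (h2 : 2 ≤ m) :
    PySem.List.pyGet? (l ++ [a]) (-(m : Int)) = PySem.List.pyGet? l (-((m - 1 : Nat) : Int)) := by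
  by_cases hm : m ≤ l.length + 1
  · have h1 : 1 ≤ l.length := by omega
    rw [PySem.List.pyGet?_neg_natCast _ _ (by omega) (by simp; omega),
        PySem.List.pyGet?_neg_natCast _ _ (by omega) (by omega)]
    rw [List.getElem?_append_left (by simp; omega)]
    congr 1
    simp; omega
  · rw [(PySem.List.pyGet?_eq_none_iff _ _).mpr (by simp [PySem.Raise.InRange]; omega),
        (PySem.List.pyGet?_eq_none_iff _ _).mpr (by simp [PySem.Raise.InRange]; omega)]

lemma pvAGo_reverse_eq (L : List (Int × List (String × String))) (m : Nat) (h : 1 ≤ m) :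
    pvAGo L.reverse (m : Int) =
      (let idxs := (L.filter (fun p => decide ((PySem.Dict.mk p.2).get? "role" = some "assistant"))).map (fun p => p.1)
       if (idxs.length : Int) < (m : Int) then none else PySem.List.pyGet? idxs (-(m : Int))) := by
  induction L using List.reverseRecOn generalizing m with
  | nil =>
    simp only [List.reverse_nil, List.filter_nil, List.map_nil, List.length_nil, Nat.cast_zero]
    rw [if_pos (by omega)]
    simp [pvAGo]
  | append_singleton l x ih =>
    by_cases hx : (PySem.Dict.mk x.2).get? "role" = some "assistant"
    · by_cases hm1 : m = 1
      · subst hm1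
        simp [pvAGo, hx, List.filter_append,
          PySem.List.pyGet?_neg_one_append_singleton]
      · have h2 : 2 ≤ m := by omega
        have hL : pvAGo ((l ++ [x]).reverse) ((m : Nat) : Int) = pvAGo l.reverse ((m : Int) - 1) := by
          rw [List.reverse_append]
          simp [pvAGo, hx, show ¬((m : Int) - 1 = 0) by omega]
        have hc : (m : Int) - 1 = ((m - 1 : Nat) : Int) := by omega
        rw [hL, hc, ih (m - 1) (by omega)]
        simp only [List.filter_append, List.filter_cons, hx, decide_true, if_true,
          List.filter_nil, List.map_append, List.map_cons, List.map_nil,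
          List.length_append, List.length_cons, List.length_nil]
        rw [pyGet?_append_singleton_neg _ _ m h2]
        by_cases hlen : (((l.filter (fun p => decide ((PySem.Dict.mk p.2).get? "role" = some "assistant"))).map (fun p => p.1)).length : Int) < ((m - 1 : Nat) : Int)
        · rw [if_pos hlen, if_pos (by push_cast at hlen ⊢; omega)]
        · rw [if_neg hlen, if_neg (by push_cast at hlen ⊢; omega)]
    · have hL : pvAGo ((l ++ [x]).reverse) ((m : Nat) : Int) = pvAGo l.reverse ((m : Nat) : Int) := by
        rw [List.reverse_append]
        simp [pvAGo, hx]
      rw [hL, ih m h]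
      simp [List.filter_append, hx]

-- ===== VERDICT (by name: the statement is the Claim_ definition above) =====
theorem find_assistant_cutoff_index_spec : Claim_equal_find_assistant_cutoff_index := by
  intro messages k _
  unfold Spec_find_assistant_cutoff_index find_assistant_cutoff_index find_assistant_cutoff_index_alt
  by_cases hk : k ≤ 0
  · simp [hk]
  · rw [if_neg hk, if_neg hk]
    have hm : k = ((k.toNat : Nat) : Int) := by omega
    rw [hm, pvAGo_reverse_eq _ k.toNat (by omega)]
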